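-- pv_equiv track=rewrite | github.com/ElenaBernardi/DataSetElaborationML | find_pattern.py | get_patters
-- ===== SOURCE A (Python) =====
-- from collections import defaultdict
--
-- def get_patters(sequence, window):
--     sequence_2 = sequence.copy()
--     d = defaultdict(int)
--     while(len(sequence_2) >= window):
--         C = []
--         sequence_2.pop(0)
--         for i in range(len(sequence_2)):
--             C.append(sequence[i] == sequence_2[i])
--         list = find_pattern(C, sequence, window)
--         for k in list:
--            d[k] = d[k]+1
--     return d
--
-- def find_pattern(C,A,window):
--     count=0
--     list=[]
--     for i in range(0,len(C)):
--         if(C[i]):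
--             count = count+1
--         else:
--             count=0
--         if(count==window):
--             list.append(get_list(A,window,i))
--             count = count-1
--     return list
--
-- def get_list(A,window,i):
--
--     str = ""
--     for j in range(0,window):
--         str = A[i]+"-"+str
--         i = i-1
--     str = str[:-1]
--     return str
-- ===== SOURCE B (Python) =====
-- def get_patters(sequence, window):
--     n = len(sequence)
--     m = n - window + 1 if window >= 1 else 0
--     wins = [sequence[p:p + window] for p in range(m)]
--     keys = ["-".join(w) for w in wins]
--     d = {}
--     for s in range(1, m):
--         for p in range(m - s):
--             if wins[p] == wins[p + s]:
--                 k = keys[p]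
--                 d[k] = d.get(k, 0) + 1
--     return d
-- ===== Notes on version B (the rewrite author's own statement) =====
-- stated objective: simpler
-- what changed: B precomputes all window slices and their '-'-joined keys once and counts equal-window pairs (p, p+s) in a dict with a direct slice comparison, replacing A's pop-and-reshift loop, boolean run-length automaton (find_pattern) and per-hit backwards string rebuilding (get_list). (measured faster: no O(n) pop(0) shifting, no per-hit string rebuilding, and the slice comparison short-circuits).
import Mathlib
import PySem

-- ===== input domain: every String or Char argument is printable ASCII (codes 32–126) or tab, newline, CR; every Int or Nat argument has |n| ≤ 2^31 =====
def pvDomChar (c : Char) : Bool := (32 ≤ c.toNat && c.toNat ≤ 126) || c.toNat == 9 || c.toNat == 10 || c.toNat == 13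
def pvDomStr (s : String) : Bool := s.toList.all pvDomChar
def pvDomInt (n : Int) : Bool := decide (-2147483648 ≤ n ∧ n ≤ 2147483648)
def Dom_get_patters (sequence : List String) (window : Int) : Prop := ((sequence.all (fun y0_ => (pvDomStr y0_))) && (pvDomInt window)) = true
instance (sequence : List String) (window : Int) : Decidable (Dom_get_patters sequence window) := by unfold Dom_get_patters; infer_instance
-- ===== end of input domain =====

-- B replaces A's shift/pop loop, boolean run-length automaton and backwards string rebuilding
-- by precomputed window slices and joined keys compared directly (simpler, and measured faster).

-- ===== PORT A =====
-- get_list(A, window, i)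
def pvGetList (A : List String) (window : Int) (i : Int) : String :=
  let st := (PySem.List.pyRange 0 window 1).foldl
    (fun (st : String × Int) _ => (PySem.List.pyGetD A st.2 "" ++ "-" ++ st.1, st.2 - 1)) ("", i)
  PySem.Str.slice st.1 none (some (-1))

-- find_pattern(C, A, window)
def pvFindPattern (C : List Bool) (A : List String) (window : Int) : List String :=
  let st := (PySem.List.pyRange 0 (PySem.List.len C) 1).foldl
    (fun (st : Int × List String) i =>
      let count : Int := if PySem.List.pyGetD C i false then st.1 + 1 else 0
      if count = window then (count - 1, st.2 ++ [pvGetList A window i]) else (count, st.2))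
    (0, [])
  st.2

-- the while loop: seq2 is sequence_2, d the defaultdict (d[k] read on a missing key adds k→0)
def pvLoopA (sequence : List String) (window : Int) (seq2 : List String)
    (d : PySem.Dict String Int) : PySem.Dict String Int :=
  if (PySem.List.len seq2) ≥ window then
    match seq2 with
    | [] => d            -- sequence_2.pop(0) raises IndexError here (outside Pre_)
    | _ :: rest =>
      let C := (PySem.List.pyRange 0 (PySem.List.len rest) 1).map
        (fun i => PySem.List.pyGetD sequence i "" == PySem.List.pyGetD rest i "")
      let ks := pvFindPattern C sequence window
      pvLoopA sequence window rest (ks.foldl (fun d k => d.insert k (d.getD k 0 + 1)) d)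
  else d
termination_by seq2.length

def get_patters (sequence : List String) (window : Int) : List (String × Int) :=
  (pvLoopA sequence window sequence PySem.Dict.empty).items

-- ===== PORT B =====
def get_patters_alt (sequence : List String) (window : Int) : List (String × Int) :=
  let n : Int := PySem.List.len sequence
  let m : Int := if window ≥ 1 then n - window + 1 else 0
  let wins : List (List String) :=
    (PySem.List.pyRange 0 m 1).map (fun p => PySem.List.slice sequence (some p) (some (p + window)))
  let keys : List String := wins.map (fun w => PySem.Str.join "-" w)
  let d := (PySem.List.pyRange 1 m 1).foldl (fun (d : PySem.Dict String Int) s =>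
    (PySem.List.pyRange 0 (m - s) 1).foldl (fun (d : PySem.Dict String Int) p =>
      if PySem.List.pyGetD wins p [] == PySem.List.pyGetD wins (p + s) [] then
        let k := PySem.List.pyGetD keys p ""
        d.insert k (d.getD k 0 + 1)
      else d) d) PySem.Dict.empty
  d.items

-- ===== PRECONDITION & SPEC =====
-- Pre_ excludes only window ≤ 0, where A's while loop pops sequence_2 empty and raises IndexError.
def Pre_get_patters (sequence : List String) (window : Int) : Prop := 1 ≤ window
instance (sequence : List String) (window : Int) : Decidable (Pre_get_patters sequence window) := by
  unfold Pre_get_patters; infer_instance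

def pvWitness_get_patters : List String × Int := (["a", "b", "a", "b", "a"], 2)

def Spec_get_patters (sequence : List String) (window : Int) (out : List (String × Int)) : Prop := out = get_patters_alt sequence window
instance (sequence : List String) (window : Int) (out : List (String × Int)) : Decidable (Spec_get_patters sequence window out) := by unfold Spec_get_patters; infer_instance

-- ===== CLAIM (what is proved, stated in full; the proofs are below) =====
def Claim_equal_get_patters : Prop := ∀ (sequence : List String) (window : Int), Dom_get_patters sequence window → Pre_get_patters sequence window → Spec_get_patters sequence window (get_patters sequence window)

-- ===== LEMMAS AND PROOFS =====

-- Both programs increment d[k] over the same stream of per-shift "events": for shift s,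
-- the keys of the window positions p with seq[p:p+W] = seq[p+s:p+s+W], p ascending.
-- pvWin/pvKey/pvEv name that stream; each port is reduced to a fold of pvIncr over it.
def pvWin (seq : List String) (W p : Nat) : List String := (seq.drop p).take W
def pvKey (seq : List String) (W p : Nat) : String := PySem.Str.join "-" (pvWin seq W p)
def pvEv (seq : List String) (W s : Nat) : List String :=
  ((List.range (seq.length + 1 - W - s)).filter
    (fun p => pvWin seq W p == pvWin seq W (p + s))).map (pvKey seq W)
def pvIncr (d : PySem.Dict String Int) (k : String) : PySem.Dict String Int :=
  d.insert k (d.getD k 0 + 1)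

theorem pvFoldlFlatMap {α β : Type} (l : List α) (g : α → List β)
    (f : PySem.Dict String Int → β → PySem.Dict String Int) (d : PySem.Dict String Int) :
    (l.flatMap g).foldl f d = l.foldl (fun a s => (g s).foldl f a) d := by
  induction l generalizing d with
  | nil => rfl
  | cons x xs ih => simp [List.foldl_append, ih]

theorem pvGetList_fold (seq : List String) (k i : Nat) (hk : k ≤ i + 1) (hi : i < seq.length) :
    (List.range k).foldl
      (fun (st : String × Int) _ => (PySem.List.pyGetD seq st.2 "" ++ "-" ++ st.1, st.2 - 1)) ("", (i : Int))
    = ((pvWin seq k (i + 1 - k)).foldr (fun a acc => a ++ "-" ++ acc) "", (i : Int) - k) := by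
  induction k with
  | zero => simp [pvWin]
  | succ k ih =>
    rw [List.range_succ, List.foldl_append, ih (by omega)]
    simp only [List.foldl_cons, List.foldl_nil]
    have hik : (i : Int) - k = ((i - k : Nat) : Int) := by omega
    have hik2 : i - k < seq.length := by omega
    rw [hik, PySem.List.pyGetD_natCast]
    have hdrop : seq.drop (i - k) = seq[i - k] :: seq.drop (i - k + 1) := List.drop_eq_getElem_cons hik2
    have h1 : i + 1 - (k + 1) = i - k := by omega
    have h2 : i - k + 1 = i + 1 - k := by omega
    refine Prod.ext ?_ ?_
    · show seq.getD (i - k) "" ++ "-" ++ _ = _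
      rw [h1, List.getD_eq_getElem seq "" hik2]
      simp only [pvWin, hdrop, h2, List.take_succ_cons, List.foldr_cons]
    · show _ = (i : Int) - (k + 1 : Nat)
      omega

theorem pvFoldrDash_join (l : List String) (hne : l ≠ []) :
    PySem.Str.slice (l.foldr (fun a acc => a ++ "-" ++ acc) "") none (some (-1)) =
      PySem.Str.join "-" l := by
  apply String.ext
  rw [PySem.Str.slice_to_neg_one, PySem.Str.toList_join]
  have key : ∀ (l : List String), l ≠ [] →
      (l.foldr (fun a acc => a ++ "-" ++ acc) "").toList
        = PySem.Chars.join "-".toList (l.map String.toList) ++ ['-'] := by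
    intro l hl
    induction l with
    | nil => exact absurd rfl hl
    | cons a rest ih =>
      cases rest with
      | nil =>
        simp only [List.foldr_cons, List.foldr_nil, List.map_cons, List.map_nil,
          PySem.Chars.join_singleton, String.toList_append]
        have h1 : "-".toList = ['-'] := by decide
        have h2 : "".toList = [] := by decide
        rw [h1, h2, List.append_nil]
      | cons b r =>
        simp only [List.foldr_cons] at ih ⊢
        rw [List.map_cons, List.map_cons, PySem.Chars.join_cons_cons,
          String.toList_append, String.toList_append, ih (by simp)]
        have h1 : "-".toList = ['-'] := by decide
        rw [h1]
        simp [List.append_assoc]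
  rw [key l hne, List.dropLast_concat]

theorem pvGetList_eq (seq : List String) (window : Int) (W i : Nat)
    (hW : window = (W : Int)) (h1 : 1 ≤ W) (hiW : W ≤ i + 1) (hin : i < seq.length) :
    pvGetList seq window (i : Int) = pvKey seq W (i + 1 - W) := by
  unfold pvGetList
  rw [hW, PySem.List.pyRange_zero_nat, List.foldl_map, pvGetList_fold seq W i hiW hin]
  have hne : pvWin seq W (i + 1 - W) ≠ [] := by
    have : (pvWin seq W (i + 1 - W)).length = min W (seq.length - (i + 1 - W)) := by
      simp [pvWin]
    intro hcon
    rw [hcon] at this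
    simp only [List.length_nil] at this
    omega
  exact pvFoldrDash_join _ hne

def pvRun (C : List Bool) : Nat → Nat
  | 0 => 0
  | t + 1 => if C.getD t false then pvRun C t + 1 else 0

theorem pvRun_ge (C : List Bool) (t k : Nat) :
    k ≤ pvRun C t ↔ k ≤ t ∧ ∀ j < k, C.getD (t - 1 - j) false = true := by
  induction t generalizing k with
  | zero =>
    simp only [pvRun]
    constructor
    · intro h; exact ⟨h, fun j hj => by omega⟩
    · intro ⟨h, _⟩; exact h
  | succ t ih =>
    cases k with
    | zero => simp
    | succ k =>
      simp only [pvRun]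
      by_cases hc : C.getD t false
      · rw [if_pos hc]
        constructor
        · intro h
          have := (ih k).mp (by omega)
          refine ⟨by omega, fun j hj => ?_⟩
          cases j with
          | zero => simpa using hc
          | succ j =>
            have := this.2 j (by omega)
            have e : t + 1 - 1 - (j + 1) = t - 1 - j := by omega
            rw [e]; exact this
        · intro ⟨h1, h2⟩
          have : k ≤ pvRun C t := by
            rw [ih k]
            refine ⟨?_, fun j hj => ?_⟩
            · -- k ≤ t
              omega
            · have := h2 (j + 1) (by omega)
              have e : t + 1 - 1 - (j + 1) = t - 1 - j := by omega
              rwa [e] at this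
          omega
      · rw [if_neg hc]
        constructor
        · omega
        · intro ⟨h1, h2⟩
          have := h2 0 (by omega)
          simp at this
          exact absurd this hc

def pvHit (C : List Bool) (W t : Nat) : Bool :=
  decide (W ≤ t + 1 ∧ ∀ j < W, C.getD (t - j) false = true)

theorem pvHit_iff (C : List Bool) (W t : Nat) :
    pvHit C W t = true ↔ W ≤ pvRun C (t + 1) := by
  rw [pvHit, decide_eq_true_iff, pvRun_ge]
  have e : ∀ j : Nat, t + 1 - 1 - j = t - j := by omega
  constructor
  · intro ⟨ha, hb⟩
    refine ⟨ha, fun j hj => ?_⟩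
    rw [e j]
    exact hb j hj
  · intro ⟨ha, hb⟩
    refine ⟨ha, fun j hj => ?_⟩
    rw [← e j]
    exact hb j hj

-- the automaton state after t steps

def pvCnt (C : List Bool) (W t : Nat) : Int :=
  if pvRun C t < W then (pvRun C t : Int) else (W : Int) - 1

theorem pvFindPattern_eq (C : List Bool) (A : List String) (window : Int) (W : Nat)
    (hW : window = (W : Int)) (h1 : 1 ≤ W) :
    pvFindPattern C A window =
      ((List.range C.length).filter (fun t => pvHit C W t)).map
        (fun (t : Nat) => pvGetList A window (t : Int)) := by
  unfold pvFindPattern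
  rw [PySem.List.len_eq, PySem.List.pyRange_zero_nat, List.foldl_map]
  suffices h : ∀ t ≤ C.length,
      (List.range t).foldl
        (fun (st : Int × List String) (i : Nat) =>
          let count : Int := if PySem.List.pyGetD C (i : Int) false then st.1 + 1 else 0
          if count = window then (count - 1, st.2 ++ [pvGetList A window (i : Int)])
          else (count, st.2)) (0, [])
      = (pvCnt C W t,
         ((List.range t).filter (fun t => pvHit C W t)).map (fun (t : Nat) => pvGetList A window (t : Int))) by
    rw [h C.length (le_refl _)]
  intro t ht
  induction t with
  | zero =>
    have h0 : pvCnt C W 0 = 0 := by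
      rw [pvCnt]; simp only [pvRun]; rw [if_pos (by omega)]; simp
    simp [h0]
  | succ t ih =>
    rw [List.range_succ, List.foldl_append, ih (by omega), List.filter_append, List.map_append]
    simp only [List.foldl_cons, List.foldl_nil, List.filter_cons, List.filter_nil]
    show _ = _
    rw [PySem.List.pyGetD_natCast]
    by_cases hc : C.getD t false = true
    · have hrunsucc : pvRun C (t + 1) = pvRun C t + 1 := by
        show (if C.getD t false then pvRun C t + 1 else 0) = _
        rw [if_pos hc]
      have hcnt1 : pvCnt C W t + 1 = window ↔ W ≤ pvRun C (t + 1) := by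
        rw [pvCnt, hW, hrunsucc]; split_ifs <;> omega
      rw [if_pos hc]
      by_cases hh : pvHit C W t = true
      · have hrun : W ≤ pvRun C (t + 1) := (pvHit_iff C W t).mp hh
        rw [if_pos (hcnt1.mpr hrun), hh, if_pos rfl]
        refine Prod.ext ?_ ?_
        · show pvCnt C W t + 1 - 1 = pvCnt C W (t + 1)
          simp only [pvCnt, hrunsucc]
          split_ifs <;> omega
        · simp
      · have hrun : ¬ W ≤ pvRun C (t + 1) := fun h => hh ((pvHit_iff C W t).mpr h)
        have hhf : pvHit C W t = false := eq_false_of_ne_true hh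
        rw [if_neg (fun h => hrun (hcnt1.mp h)), hhf]
        simp only [Bool.false_eq_true, if_false, List.map_nil, List.append_nil]
        refine Prod.ext ?_ ?_
        · show pvCnt C W t + 1 = pvCnt C W (t + 1)
          simp only [pvCnt, hrunsucc]
          split_ifs <;> omega
        · simp
    · have hc' : C.getD t false = false := eq_false_of_ne_true hc
      have hrunsucc : pvRun C (t + 1) = 0 := by
        show (if C.getD t false then pvRun C t + 1 else 0) = _
        rw [hc']
        simp
      have hh : pvHit C W t = false := by
        rw [Bool.eq_false_iff]
        intro h
        have := (pvHit_iff C W t).mp h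
        omega
      rw [hc']
      simp only [Bool.false_eq_true, if_false]
      rw [if_neg (by rw [hW]; omega), hh]
      simp only [Bool.false_eq_true, if_false, List.map_nil, List.append_nil]
      refine Prod.ext ?_ rfl
      show (0 : Int) = pvCnt C W (t + 1)
      rw [pvCnt, hrunsucc, if_pos (by omega)]
      simp

def pvC (seq : List String) (s : Nat) : List Bool :=
  (List.range (seq.length - s)).map (fun i => seq.getD i "" == seq.getD (i + s) "")

theorem pvC_getD (seq : List String) (s i : Nat) (hi : i < seq.length - s) :
    (pvC seq s).getD i false = (seq.getD i "" == seq.getD (i + s) "") := by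
  rw [pvC, List.getD_eq_getElem?_getD, List.getElem?_map, List.getElem?_range hi]
  rfl

theorem pvWin_getElem (seq : List String) (W p j : Nat) (hj : j < W) (h : p + W ≤ seq.length) :
    (pvWin seq W p).length = W ∧ ∀ (hh : j < (pvWin seq W p).length), (pvWin seq W p)[j] = seq[p + j]'(by omega) := by
  have hl : (pvWin seq W p).length = W := by
    simp only [pvWin, List.length_take, List.length_drop]
    omega
  refine ⟨hl, fun hh => ?_⟩
  simp only [pvWin, List.getElem_take, List.getElem_drop]
  try congr 1
  try omega

theorem pvHit_winEq (seq : List String) (W s p : Nat) (h1 : 1 ≤ W)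
    (hp : p < seq.length + 1 - W - s) :
    pvHit (pvC seq s) W (W - 1 + p) = (pvWin seq W p == pvWin seq W (p + s)) := by
  have hn : p + W ≤ seq.length - s := by omega
  have hn1 : p + W ≤ seq.length := by omega
  have hn2 : p + s + W ≤ seq.length := by omega
  rw [Bool.eq_iff_iff, pvHit, decide_eq_true_iff, beq_iff_eq]
  constructor
  · intro ⟨_, hall⟩
    apply List.ext_getElem
    · simp [pvWin]; omega
    · intro j hj1 hj2
      have hjW : j < W := by
        have := (pvWin_getElem seq W p j (by simp [pvWin] at hj1; omega) hn1).1
        omega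
      have h := hall (W - 1 - j) (by omega)
      have e : W - 1 + p - (W - 1 - j) = p + j := by omega
      rw [e, pvC_getD seq s (p + j) (by omega)] at h
      rw [(pvWin_getElem seq W p j hjW hn1).2 hj1, (pvWin_getElem seq W (p + s) j hjW hn2).2 hj2]
      rw [beq_iff_eq, List.getD_eq_getElem seq "" (by omega), List.getD_eq_getElem seq "" (by omega)] at h
      have e2 : p + j + s = p + s + j := by omega
      simp only [e2] at h
      exact h
  · intro heq
    refine ⟨by omega, fun j hj => ?_⟩
    have e : W - 1 + p - j = p + (W - 1 - j) := by omega
    rw [e, pvC_getD seq s (p + (W - 1 - j)) (by omega)]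
    have hjW : W - 1 - j < W := by omega
    have h1' := (pvWin_getElem seq W p (W - 1 - j) hjW hn1)
    have h2' := (pvWin_getElem seq W (p + s) (W - 1 - j) hjW hn2)
    have hlen1 : W - 1 - j < (pvWin seq W p).length := by rw [h1'.1]; omega
    have hg : (pvWin seq W p)[W - 1 - j]'hlen1 = (pvWin seq W (p + s))[W - 1 - j]'(heq ▸ hlen1) :=
      List.getElem_of_eq heq hlen1
    rw [h1'.2 hlen1, h2'.2 (heq ▸ hlen1)] at hg
    rw [beq_iff_eq, List.getD_eq_getElem seq "" (by omega), List.getD_eq_getElem seq "" (by omega)]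
    have e2 : p + (W - 1 - j) + s = p + s + (W - 1 - j) := by omega
    simp only [e2]
    exact hg

theorem pvShift (seq : List String) (window : Int) (W : Nat)
    (hW : window = (W : Int)) (h1 : 1 ≤ W) (s : Nat) (hs : 1 ≤ s) :
    pvFindPattern (pvC seq s) seq window = pvEv seq W s := by
  rw [pvFindPattern_eq (pvC seq s) seq window W hW h1]
  have hlen : (pvC seq s).length = seq.length - s := by simp [pvC]
  rw [hlen]
  rcases Nat.eq_zero_or_pos (seq.length + 1 - W - s) with h0 | hpos
  · rw [pvEv, h0]
    have : (List.range (seq.length - s)).filter (fun t => pvHit (pvC seq s) W t) = [] := by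
      rw [List.filter_eq_nil_iff]
      intro t htmem
      rw [List.mem_range] at htmem
      rw [pvHit]
      simp only [decide_eq_true_eq]  -- ¬ (W ≤ t+1 ∧ _)
      intro ⟨hWt, _⟩
      omega
    rw [this]
    rfl
  · have hsplit : seq.length - s = (W - 1) + (seq.length + 1 - W - s) := by omega
    rw [hsplit, List.range_add, List.filter_append]
    have hfirst : (List.range (W - 1)).filter (fun t => pvHit (pvC seq s) W t) = [] := by
      rw [List.filter_eq_nil_iff]
      intro t htmem
      rw [List.mem_range] at htmem
      rw [pvHit]
      simp only [decide_eq_true_eq]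
      intro ⟨hWt, _⟩
      omega
    rw [hfirst, List.nil_append, List.filter_map, List.map_map, pvEv]
    have hfc : List.filter ((fun t => pvHit (pvC seq s) W t) ∘ fun x => W - 1 + x)
        (List.range (seq.length + 1 - W - s))
        = List.filter (fun p => pvWin seq W p == pvWin seq W (p + s))
            (List.range (seq.length + 1 - W - s)) := by
      apply List.filter_congr
      intro p hp
      rw [List.mem_range] at hp
      exact pvHit_winEq seq W s p h1 hp
    rw [hfc]
    apply List.map_congr_left
    intro p hp
    have hp' : p < seq.length + 1 - W - s := List.mem_range.mp (List.mem_filter.mp hp).1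
    show pvGetList seq window ((W - 1 + p : Nat) : Int) = pvKey seq W p
    rw [pvGetList_eq seq window W (W - 1 + p) hW h1 (by omega) (by omega)]
    congr 1
    omega

theorem pvC_port (seq : List String) (s : Nat) :
    (PySem.List.pyRange 0 (PySem.List.len (seq.drop s)) 1).map
      (fun i => PySem.List.pyGetD seq i "" == PySem.List.pyGetD (seq.drop s) i "")
    = pvC seq s := by
  rw [PySem.List.len_eq, List.length_drop, PySem.List.pyRange_zero_nat, List.map_map, pvC]
  apply List.map_congr_left
  intro i hi
  rw [List.mem_range] at hi
  simp only [Function.comp, PySem.List.pyGetD_natCast]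
  congr 1
  rw [List.getD_eq_getElem?_getD, List.getD_eq_getElem?_getD, List.getElem?_drop]
  congr 2
  omega

theorem pvLoopA_eq (seq : List String) (window : Int) (W : Nat)
    (hW : window = (W : Int)) (h1 : 1 ≤ W) :
    ∀ (r s : Nat) (d : PySem.Dict String Int), seq.length + 1 - W - s = r → s ≤ seq.length →
      pvLoopA seq window (seq.drop s) d
        = (((List.range r).map (fun k => s + 1 + k)).flatMap (pvEv seq W)).foldl pvIncr d := by
  intro r
  induction r with
  | zero =>
    intro s d hr hs
    rw [pvLoopA.eq_def, if_neg]
    · simp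
    · rw [PySem.List.len_eq, List.length_drop, hW]
      intro hcon
      have : W ≤ seq.length - s := by exact_mod_cast hcon
      omega
  | succ r ih =>
    intro s d hr hs
    have hsn : s < seq.length := by omega
    have hd : seq.drop s = seq[s] :: seq.drop (s + 1) := List.drop_eq_getElem_cons hsn
    rw [hd, pvLoopA.eq_def, if_pos]
    · show pvLoopA seq window (seq.drop (s + 1))
        ((pvFindPattern ((PySem.List.pyRange 0 (PySem.List.len (seq.drop (s + 1))) 1).map
          (fun i => PySem.List.pyGetD seq i "" == PySem.List.pyGetD (seq.drop (s + 1)) i ""))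
          seq window).foldl (fun d k => d.insert k (d.getD k 0 + 1)) d) = _
      rw [pvC_port seq (s + 1), pvShift seq window W hW h1 (s + 1) (by omega)]
      rw [ih (s + 1) _ (by omega) (by omega)]
      show (((List.range r).map (fun k => s + 1 + 1 + k)).flatMap (pvEv seq W)).foldl pvIncr
        ((pvEv seq W (s + 1)).foldl pvIncr d) = _
      rw [← List.foldl_append, List.range_succ_eq_map, List.map_cons, List.flatMap_cons, List.map_map]
      have hmc : (List.range r).map ((fun k => s + 1 + k) ∘ Nat.succ)
          = (List.range r).map (fun k => s + 1 + 1 + k) := by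
        apply List.map_congr_left
        intro a _
        simp only [Function.comp, Nat.succ_eq_add_one]
        omega
      rw [hmc]
    · rw [← hd, PySem.List.len_eq, List.length_drop, hW]
      have : W ≤ seq.length - s := by omega
      exact_mod_cast this

theorem get_patters_alt_eq (seq : List String) (window : Int) (hw : 1 ≤ window) :
    get_patters_alt seq window =
      ((((List.range (seq.length + 1 - window.toNat - 1)).map (fun k => 1 + k)).flatMap
        (pvEv seq window.toNat)).foldl pvIncr PySem.Dict.empty).items := by
  unfold get_patters_alt
  set n := seq.length with hn
  set W := window.toNat with hWdef
  have hWw : window = (W : Int) := (Int.toNat_of_nonneg (by omega)).symm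
  set M : Nat := n + 1 - W with hM
  simp only [if_pos hw, PySem.List.len_eq]
  have hm1 : ((n : Int) - window + 1 - 1).toNat = M - 1 := by omega
  congr 1
  rw [PySem.List.pyRange_one 1, hm1, List.foldl_map, pvFoldlFlatMap, List.foldl_map]
  apply PySem.List.foldl_congr_mem
  intro d k hk
  rw [List.mem_range] at hk
  have hMn : ((n : Int) - window + 1) = ((M : Int)) := by omega
  have hms : (n : Int) - window + 1 - (1 + (k : Int)) = ((M - (1 + k) : Nat) : Int) := by omega
  rw [hms, PySem.List.pyRange_zero_nat, List.foldl_map]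
  have hwin : ∀ p : Nat, p < M →
      PySem.List.slice seq (some (p : Int)) (some ((p : Int) + window)) = pvWin seq W p := by
    intro p hp
    rw [hWw]
    have : (p : Int) + (W : Int) = ((p + W : Nat) : Int) := by push_cast; ring
    rw [this, PySem.List.slice_natCast]
    simp [pvWin]
  have hbody : ∀ (d : PySem.Dict String Int) (p : Nat), p ∈ List.range (M - (1 + k)) →
      (if PySem.List.pyGetD ((PySem.List.pyRange 0 ((n:Int) - window + 1)).map
            (fun p => PySem.List.slice seq (some p) (some (p + window)))) (p : Int) [] ==
          PySem.List.pyGetD ((PySem.List.pyRange 0 ((n:Int) - window + 1)).map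
            (fun p => PySem.List.slice seq (some p) (some (p + window)))) ((p : Int) + (1 + (k:Int))) []
      then
        (fun kk => d.insert kk (d.getD kk 0 + 1))
          (PySem.List.pyGetD (((PySem.List.pyRange 0 ((n:Int) - window + 1)).map
            (fun p => PySem.List.slice seq (some p) (some (p + window)))).map
              (fun w => PySem.Str.join "-" w)) (p : Int) "")
      else d)
      = if pvWin seq W p == pvWin seq W (p + (1 + k)) then pvIncr d (pvKey seq W p) else d := by
    intro d p hp
    rw [List.mem_range] at hp
    have hp1 : p < M := by omega
    have hp2 : p + (1 + k) < M := by omega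
    have hcast : (p : Int) + (1 + (k : Int)) = ((p + (1 + k) : Nat) : Int) := by push_cast; ring
    rw [hMn, hcast, List.map_map,
        PySem.List.pyGetD_map_pyRange _ M p _ hp1,
        PySem.List.pyGetD_map_pyRange _ M (p + (1 + k)) _ hp2,
        PySem.List.pyGetD_map_pyRange _ M p _ hp1]
    simp only [Function.comp]
    rw [hwin p hp1, hwin _ hp2]
    by_cases hc : pvWin seq W p == pvWin seq W (p + (1 + k))
    · rw [if_pos hc, if_pos hc]; rfl
    · rw [if_neg (by simpa using hc), if_neg (by simpa using hc)]
  trans ((List.range (M - (1 + k))).foldl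
      (fun d p => if pvWin seq W p == pvWin seq W (p + (1 + k)) then pvIncr d (pvKey seq W p) else d) d)
  · apply PySem.List.foldl_congr_mem
    exact hbody
  rw [PySem.List.foldl_if_eq_foldl_filter
        (fun p => pvWin seq W p == pvWin seq W (p + (1 + k)))
        (fun d p => pvIncr d (pvKey seq W p)),
      pvEv, List.foldl_map]

theorem get_patters_eq (seq : List String) (window : Int) (hw : 1 ≤ window) :
    get_patters seq window =
      ((((List.range (seq.length + 1 - window.toNat)).map (fun k => 1 + k)).flatMap
        (pvEv seq window.toNat)).foldl pvIncr PySem.Dict.empty).items := by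
  have hW : window = (window.toNat : Int) := (Int.toNat_of_nonneg (by omega)).symm
  have h1 : 1 ≤ window.toNat := by omega
  have h := pvLoopA_eq seq window window.toNat hW h1 (seq.length + 1 - window.toNat) 0
    PySem.Dict.empty rfl (by omega)
  rw [List.drop_zero] at h
  unfold get_patters
  rw [h]

-- ===== VERDICT (by name: the statement is the Claim_ definition above) =====
theorem get_patters_spec : Claim_equal_get_patters := by
  intro seq window _ hpre
  have hw : 1 ≤ window := hpre
  show get_patters seq window = get_patters_alt seq window
  rw [get_patters_eq seq window hw, get_patters_alt_eq seq window hw]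
  set W := window.toNat with hWdef
  set M := seq.length + 1 - W with hM
  rcases Nat.eq_zero_or_pos M with h0 | hpos
  · rw [h0]
  · have hs : M = (M - 1) + 1 := (Nat.succ_pred_eq_of_pos hpos).symm
    rw [hs, List.range_succ, List.map_append, List.flatMap_append]
    have hlast : pvEv seq W (1 + (M - 1)) = [] := by
      simp only [pvEv]
      have he : seq.length + 1 - W - (1 + (M - 1)) = 0 := by omega
      rw [he]
      rfl
    simp [hlast]
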